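-- pv_equiv track=rewrite | github.com/chaitanyakrishnavakkanti/taas | speaker_diarization.py | _assign_missing_labels
-- ===== SOURCE A (Python) =====
-- def _assign_missing_labels(speakers, valid_idx, segments):
--     if not valid_idx:
--         return speakers
--
--     for i in range(len(speakers)):
--         if speakers[i] != 1 or i in valid_idx:
--             continue
--
--         left = None
--         right = None
--
--         for j in range(i - 1, -1, -1):
--             if speakers[j] > 0:
--                 left = speakers[j]
--                 break
--         for j in range(i + 1, len(speakers)):
--             if speakers[j] > 0:
--                 right = speakers[j]
--                 break
--
--         text = (segments[i].get("text") or "").strip()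
--         if left is not None and right is not None and left == right:
--             speakers[i] = left
--         elif left is not None:
--             speakers[i] = left
--         elif right is not None:
--             speakers[i] = right
--         elif text:
--             speakers[i] = 1
--
--     return speakers
-- ===== SOURCE B (Python) =====
-- def _assign_missing_labels(speakers, valid_idx, segments):
--     # Same return value as A: precompute nearest positive label to the
--     # right (backward pass over the original list), keep a running nearest
--     # positive to the left while building the output forward.
--     # Like A, mutates `speakers` in place and returns it.
--     if not valid_idx:
--         return speakers
--
--     rights = []
--     nxt = None
--     for v in reversed(speakers):
--         rights.append(nxt)
--         if v > 0:
--             nxt = v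
--     rights.reverse()
--
--     vset = set(valid_idx)
--     out = []
--     left = None
--     for i, (v, r) in enumerate(zip(speakers, rights)):
--         if v == 1 and i not in vset:
--             text = (segments[i].get("text") or "").strip()
--             if left is not None:
--                 v = left
--             elif r is not None:
--                 v = r
--             elif text:
--                 v = 1
--         out.append(v)
--         if v > 0:
--             left = v
--     speakers[:] = out
--     return speakers
-- ===== Notes on version B (the rewrite author's own statement) =====
-- stated objective: alternative
-- what changed: Replaces A's per-missing-index linear scans to the left and right (and list membership test) by one backward pass precomputing the nearest positive label to the right plus a running nearest-positive-to-the-left carried through a single forward pass with a set for valid_idx.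
import Mathlib
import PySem

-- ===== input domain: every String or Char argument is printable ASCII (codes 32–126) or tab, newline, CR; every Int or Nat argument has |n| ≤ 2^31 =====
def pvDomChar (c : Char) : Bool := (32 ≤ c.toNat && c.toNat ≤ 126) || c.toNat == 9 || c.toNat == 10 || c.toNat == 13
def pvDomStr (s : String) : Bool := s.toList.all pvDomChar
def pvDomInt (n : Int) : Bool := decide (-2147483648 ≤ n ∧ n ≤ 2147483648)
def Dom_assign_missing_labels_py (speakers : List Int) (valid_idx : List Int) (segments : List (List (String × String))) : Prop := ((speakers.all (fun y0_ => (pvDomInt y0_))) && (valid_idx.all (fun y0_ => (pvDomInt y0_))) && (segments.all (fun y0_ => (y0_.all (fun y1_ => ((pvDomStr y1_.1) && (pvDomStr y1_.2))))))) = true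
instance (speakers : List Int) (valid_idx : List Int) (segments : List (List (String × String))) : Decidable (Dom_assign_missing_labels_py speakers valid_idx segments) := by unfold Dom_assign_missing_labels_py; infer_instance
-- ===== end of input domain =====

-- B replaces A's per-missing-index left/right scans by one backward pass (nearest positive to
-- the right) plus a running nearest-positive-to-the-left in a single forward pass.
-- Both Pythons mutate `speakers` in place and return it; the theorems are about the return value.

-- ===== PORT A =====
def pvAGet (s : List Int) (i : Int) : Int := PySem.List.pyGetD s i 0

def pvGetText (segments : List (List (String × String))) (i : Int) : String :=
  PySem.Str.strip (((PySem.Dict.mk ((PySem.List.pyGet? segments i).getD [])).get? "text").getD "")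

def pvAScan (s : List Int) (r : List Int) : Option Int :=
  r.findSome? (fun j => if pvAGet s j > 0 then some (pvAGet s j) else none)

def pvAStep (valid_idx : List Int) (segments : List (List (String × String)))
    (s : List Int) (i : Int) : List Int :=
  if pvAGet s i ≠ 1 ∨ valid_idx.contains i then s
  else
    let left := pvAScan s (PySem.List.pyRange (i - 1) (-1) (-1))
    let right := pvAScan s (PySem.List.pyRange (i + 1) (s.length : Int) 1)
    let text := pvGetText segments i
    if left.isSome && right.isSome && left == right then PySem.List.pySetD s i (left.getD 0)
    else if left.isSome then PySem.List.pySetD s i (left.getD 0)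
    else if right.isSome then PySem.List.pySetD s i (right.getD 0)
    else if text ≠ "" then PySem.List.pySetD s i 1
    else s

def assign_missing_labels_py (speakers : List Int) (valid_idx : List Int) (segments : List (List (String × String))) : List Int :=
  if valid_idx = [] then speakers
  else (PySem.List.pyRange 0 (speakers.length : Int) 1).foldl (pvAStep valid_idx segments) speakers

-- ===== PORT B =====
-- backward pass over reversed(speakers): nearest positive strictly to the right
def pvRightsRev : List Int → Option Int → List (Option Int)
  | [], _ => []
  | v :: rest, nxt => nxt :: pvRightsRev rest (if v > 0 then some v else nxt)

-- forward pass with running nearest positive to the left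
def pvBLoop (vset : PySem.Set Int) (segments : List (List (String × String))) :
    List (Int × Option Int) → Int → Option Int → List Int
  | [], _, _ => []
  | (v, r) :: rest, i, left =>
      let v' :=
        if v = 1 ∧ ¬ vset.contains i then
          let text := pvGetText segments i
          match left with
          | some l => l
          | none =>
            match r with
            | some rr => rr
            | none => if text ≠ "" then 1 else v
        else v
      v' :: pvBLoop vset segments rest (i + 1) (if v' > 0 then some v' else left)

def assign_missing_labels_py_alt (speakers : List Int) (valid_idx : List Int) (segments : List (List (String × String))) : List Int :=
  if valid_idx = [] then speakers
  else
    let rights := (pvRightsRev speakers.reverse none).reverse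
    pvBLoop (PySem.Set.ofList valid_idx) segments (speakers.zip rights) 0 none

-- ===== PRECONDITION & SPEC =====
-- Pre_ excludes exactly the inputs where A raises IndexError: some processed index
-- (speakers[i] == 1 and i not in valid_idx) has no segment segments[i].
def Pre_assign_missing_labels_py (speakers : List Int) (valid_idx : List Int) (segments : List (List (String × String))) : Prop :=
  valid_idx = [] ∨
    ∀ i ∈ List.range speakers.length,
      speakers.getD i 0 = 1 → ¬ valid_idx.contains (i : Int) → i < segments.length

instance (speakers : List Int) (valid_idx : List Int) (segments : List (List (String × String))) : Decidable (Pre_assign_missing_labels_py speakers valid_idx segments) := by unfold Pre_assign_missing_labels_py; infer_instance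

def pvWitness_assign_missing_labels_py : List Int × List Int × (List (List (String × String))) :=
  ([1, 2, 1], [5], [[("text", " a ")], [], [("x", "y")]])

def Spec_assign_missing_labels_py (speakers : List Int) (valid_idx : List Int) (segments : List (List (String × String))) (out : List Int) : Prop := out = assign_missing_labels_py_alt speakers valid_idx segments
instance (speakers : List Int) (valid_idx : List Int) (segments : List (List (String × String))) (out : List Int) : Decidable (Spec_assign_missing_labels_py speakers valid_idx segments out) := by unfold Spec_assign_missing_labels_py; infer_instance

-- ===== CLAIM (what is proved, stated in full; the proofs are below) =====
def Claim_equal_assign_missing_labels_py : Prop := ∀ (speakers : List Int) (valid_idx : List Int) (segments : List (List (String × String))), Dom_assign_missing_labels_py speakers valid_idx segments → Pre_assign_missing_labels_py speakers valid_idx segments → Spec_assign_missing_labels_py speakers valid_idx segments (assign_missing_labels_py speakers valid_idx segments)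

-- ===== LEMMAS AND PROOFS =====

-- nearest positive label in a list, scanning front to back
def pvNearestPos (l : List Int) : Option Int :=
  l.findSome? (fun v => if v > 0 then some v else none)

-- common reference recursion both ports are reduced to
def pvRef (valid_idx : List Int) (segments : List (List (String × String))) :
    List Int → List Int → Int → List Int
  | _, [], _ => []
  | prefRev, v :: rest, i =>
      let v' :=
        if v = 1 ∧ ¬ valid_idx.contains i then
          match pvNearestPos prefRev with
          | some l => l
          | none =>
            match pvNearestPos rest with
            | some r => r
            | none => if pvGetText segments i ≠ "" then 1 else v
        else v
      v' :: pvRef valid_idx segments (v' :: prefRev) rest (i + 1)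

theorem pvNearestPos_cons (v : Int) (l : List Int) :
    pvNearestPos (v :: l) = if v > 0 then some v else pvNearestPos l := by
  by_cases h : v > 0 <;> simp [pvNearestPos, List.findSome?_cons, h]

-- ===== B side =====

theorem pvSet_contains_ofList (xs : List Int) (i : Int) :
    (PySem.Set.ofList xs).contains i = xs.contains i := by
  simp [List.contains_eq_mem, PySem.Set.mem_ofList]

theorem pvRightsRev_append (xs ys : List Int) (acc : Option Int) :
    pvRightsRev (xs ++ ys) acc
      = pvRightsRev xs acc ++ pvRightsRev ys (xs.foldl (fun a v => if v > 0 then some v else a) acc) := by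
  induction xs generalizing acc with
  | nil => simp [pvRightsRev]
  | cons v xs ih => simp [pvRightsRev, ih]

theorem pvLastSeen_eq (ys : List Int) (acc : Option Int) :
    ys.foldl (fun a v => if v > 0 then some v else a) acc
      = match pvNearestPos ys.reverse with
        | some p => some p
        | none => acc := by
  induction ys generalizing acc with
  | nil => simp [pvNearestPos]
  | cons v ys ih =>
      rw [List.foldl_cons, ih]
      simp only [pvNearestPos, List.reverse_cons, List.findSome?_append]
      by_cases h : v > 0 <;>
        cases hc : List.findSome? (fun v => if v > 0 then some v else none) ys.reverse <;>
        simp [h, hc, List.findSome?_cons]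

-- rights list aligned with the forward list: rights (v :: rest) = nearestPos rest :: rights rest
theorem pvRights_cons (v : Int) (rest : List Int) :
    (pvRightsRev (v :: rest).reverse none).reverse
      = pvNearestPos rest :: (pvRightsRev rest.reverse none).reverse := by
  rw [List.reverse_cons, pvRightsRev_append, pvLastSeen_eq]
  simp only [pvRightsRev, List.reverse_append, List.reverse_cons, List.reverse_nil,
    List.nil_append, List.cons_append, List.reverse_reverse]
  cases h : pvNearestPos rest <;> simp [h]

theorem pvBLoop_eq_ref (valid_idx : List Int) (segments : List (List (String × String)))
    (rest : List Int) (prefRev : List Int) (i : Int) :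
    pvBLoop (PySem.Set.ofList valid_idx) segments
        (rest.zip ((pvRightsRev rest.reverse none).reverse)) i (pvNearestPos prefRev)
      = pvRef valid_idx segments prefRev rest i := by
  induction rest generalizing prefRev i with
  | nil => simp [pvBLoop, pvRef]
  | cons v rest ih =>
      rw [pvRights_cons]
      rw [List.zip_cons_cons]
      show pvBLoop (PySem.Set.ofList valid_idx) segments _ i (pvNearestPos prefRev) = _
      rw [pvBLoop, pvRef]
      rw [pvSet_contains_ofList]
      set v' := (if v = 1 ∧ ¬(valid_idx.contains i = true) then
          match pvNearestPos prefRev with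
          | some l => l
          | none =>
            match pvNearestPos rest with
            | some rr => rr
            | none => if pvGetText segments i ≠ "" then 1 else v
        else v) with hv'
      have hleft : (if v' > 0 then some v' else pvNearestPos prefRev) = pvNearestPos (v' :: prefRev) := by
        rw [pvNearestPos_cons]
      rw [hleft, ih]

-- ===== A side =====

theorem pvAGet_append (P Q : List Int) (v : Int) :
    pvAGet (P.reverse ++ v :: Q) (P.length : Int) = v := by
  have h := PySem.List.pyGet?_append_length P.reverse (v :: Q).tail v
  simp only [List.length_reverse, List.tail_cons] at h
  simp [pvAGet, PySem.List.pyGetD, h]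

theorem pvLeftScan_eq (P Q : List Int) :
    pvAScan (P.reverse ++ Q) (PySem.List.pyRange ((P.length : Int) - 1) (-1) (-1))
      = pvNearestPos P := by
  induction P generalizing Q with
  | nil =>
      rw [show (((([] : List Int)).length : Int) - 1) = -1 by simp,
        PySem.List.pyRange_neg_one_eq_nil (by omega)]
      simp [pvAScan, pvNearestPos]
  | cons p P ih =>
      have hlen : (((p :: P).length : Int)) - 1 = (P.length : Int) := by simp
      have hlist : (p :: P).reverse ++ Q = P.reverse ++ p :: Q := by
        simp [List.reverse_cons]
      rw [hlen, PySem.List.pyRange_neg_one_cons (by omega), hlist]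
      have hhead := pvAGet_append P Q p
      by_cases hp : p > 0
      · simp [pvAScan, List.findSome?_cons, hhead, hp, pvNearestPos_cons]
      · rw [pvNearestPos_cons, if_neg hp]
        have htail := ih (p :: Q)
        simp only [pvAScan] at htail ⊢
        rw [List.findSome?_cons]
        simp [hhead, hp, htail]

theorem pvRightScan_eq (P Q : List Int) (v : Int) :
    pvAScan (P.reverse ++ v :: Q)
        (PySem.List.pyRange ((P.length : Int) + 1) ((P.reverse ++ v :: Q).length : Int) 1)
      = pvNearestPos Q := by
  have hmap : pvAScan (P.reverse ++ v :: Q) (PySem.List.pyRange ((P.length : Int) + 1) (((P.reverse ++ v :: Q).length : Int)) 1)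
      = pvNearestPos ((PySem.List.pyRange ((P.length : Int) + 1) (((P.reverse ++ v :: Q).length : Int)) 1).map
          (fun j => PySem.List.pyGetD (P.reverse ++ v :: Q) j 0)) := by
    rw [pvNearestPos, List.findSome?_map]
    rfl
  rw [hmap, PySem.List.map_pyGetD_pyRange' (P.reverse ++ v :: Q) 0 (by omega)]
  have hdrop : List.drop ((P.length : Int) + 1).toNat (P.reverse ++ v :: Q) = Q := by
    have : ((P.length : Int) + 1).toNat = (P.reverse ++ [v]).length := by simp
    rw [this, show P.reverse ++ v :: Q = (P.reverse ++ [v]) ++ Q by simp]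
    exact List.drop_left' rfl
  rw [hdrop]

theorem pvSetMid (P Q : List Int) (v w : Int) :
    PySem.List.pySetD (P.reverse ++ v :: Q) (P.length : Int) w = P.reverse ++ w :: Q := by
  have h : ((P.length : Nat) : Int) = (P.length : Int) := rfl
  rw [PySem.List.pySetD_natCast]
  rw [List.set_append]
  simp

theorem pvAFold_tail (valid_idx : List Int) (segments : List (List (String × String)))
    (rest prefRev : List Int) (v' : Int)
    (ih : ∀ prefRev' : List Int,
      (PySem.List.pyRange (prefRev'.length : Int) ((prefRev'.length : Int) + (rest.length : Int)) 1).foldl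
          (pvAStep valid_idx segments) (prefRev'.reverse ++ rest)
        = prefRev'.reverse ++ pvRef valid_idx segments prefRev' rest (prefRev'.length : Int)) :
    (PySem.List.pyRange ((prefRev.length : Int) + 1) (((prefRev.length : Int) + 1) + (rest.length : Int)) 1).foldl
        (pvAStep valid_idx segments) (prefRev.reverse ++ v' :: rest)
      = prefRev.reverse ++ v' :: pvRef valid_idx segments (v' :: prefRev) rest ((prefRev.length : Int) + 1) := by
  have h := ih (v' :: prefRev)
  have hlen : (((v' :: prefRev).length : Int)) = (prefRev.length : Int) + 1 := by simp
  have hlist : (v' :: prefRev).reverse ++ rest = prefRev.reverse ++ v' :: rest := by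
    simp [List.reverse_cons]
  rw [hlen, hlist] at h
  rw [h]
  simp [List.reverse_cons]

theorem pvAFold_eq_ref (valid_idx : List Int) (segments : List (List (String × String)))
    (rest prefRev : List Int) :
    (PySem.List.pyRange (prefRev.length : Int) ((prefRev.length : Int) + (rest.length : Int)) 1).foldl
        (pvAStep valid_idx segments) (prefRev.reverse ++ rest)
      = prefRev.reverse ++ pvRef valid_idx segments prefRev rest (prefRev.length : Int) := by
  induction rest generalizing prefRev with
  | nil =>
      simp only [List.length_nil, Int.natCast_zero, add_zero, List.append_nil]
      rw [show PySem.List.pyRange (prefRev.length : Int) (prefRev.length : Int) 1 = [] by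
        simp [PySem.List.pyRange]]
      simp [pvRef]
  | cons v rest ih =>
      have hlt : (prefRev.length : Int) < (prefRev.length : Int) + ((v :: rest).length : Int) := by
        simp only [List.length_cons]; push_cast; omega
      rw [PySem.List.pyRange_one_cons hlt, List.foldl_cons]
      have hend : (prefRev.length : Int) + ((v :: rest).length : Int)
          = ((prefRev.length : Int) + 1) + (rest.length : Int) := by
        simp only [List.length_cons]; push_cast; ring
      rw [hend]
      have hget := pvAGet_append prefRev rest v
      have hL := pvLeftScan_eq prefRev (v :: rest)
      have hR := pvRightScan_eq prefRev rest v
      rw [pvRef]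
      by_cases hcond : pvAGet (prefRev.reverse ++ v :: rest) (prefRev.length : Int) ≠ 1 ∨ valid_idx.contains (prefRev.length : Int)
      · -- not processed
        rw [pvAStep, if_pos hcond]
        have hcond' : ¬ (v = 1 ∧ ¬ valid_idx.contains (prefRev.length : Int) = true) := by
          rw [hget] at hcond
          rcases hcond with h | h
          · exact fun hh => h hh.1
          · exact fun hh => hh.2 h
        rw [if_neg hcond']
        exact pvAFold_tail valid_idx segments rest prefRev v ih
      · -- processed
        rw [pvAStep, if_neg hcond]
        rw [hget] at hcond
        push_neg at hcond
        obtain ⟨hv1, hni⟩ := hcond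
        have hv1' : v = 1 := by simpa using hv1
        have hnif : valid_idx.contains (prefRev.length : Int) = false := by simpa using hni
        have hmem : (prefRev.length : Int) ∉ valid_idx := by
          rw [List.contains_eq_mem] at hnif; simpa using hnif
        have hcondT : v = 1 ∧ ¬ valid_idx.contains (prefRev.length : Int) = true :=
          ⟨hv1', by simp [hmem]⟩
        rw [if_pos hcondT]
        simp only [hL, hR]
        cases hLc : pvNearestPos prefRev with
        | some l =>
            have hset := pvSetMid prefRev rest v l
            cases hRc : pvNearestPos rest with
            | some r =>
                by_cases hlr : l = r
                · subst hlr
                  simp only [hLc, hRc, Option.isSome_some, Bool.true_and, beq_iff_eq,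
                    Option.some.injEq, Option.getD_some]
                  rw [if_pos (by simp), hset]
                  exact pvAFold_tail valid_idx segments rest prefRev l ih
                · simp only [hLc, hRc, Option.isSome_some, Bool.true_and, Option.getD_some]
                  rw [if_neg (by simp [hlr]), if_pos (by simp), hset]
                  exact pvAFold_tail valid_idx segments rest prefRev l ih
            | none =>
                simp only [hLc, hRc, Option.isSome_some, Option.isSome_none, Bool.and_false,
                  Bool.false_and, Option.getD_some]
                rw [if_neg (by simp), if_pos (by simp), hset]
                exact pvAFold_tail valid_idx segments rest prefRev l ih
        | none =>
            cases hRc : pvNearestPos rest with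
            | some r =>
                have hset := pvSetMid prefRev rest v r
                simp only [hLc, hRc, Option.isSome_none, Option.isSome_some, Bool.false_and,
                  Bool.and_false, Option.getD_some]
                rw [if_neg (by simp), if_neg (by simp), if_pos (by simp), hset]
                exact pvAFold_tail valid_idx segments rest prefRev r ih
            | none =>
                simp only [hLc, hRc, Option.isSome_none, Bool.false_and]
                rw [if_neg (by simp), if_neg (by simp), if_neg (by simp)]
                by_cases ht : pvGetText segments (prefRev.length : Int) ≠ ""
                · rw [if_pos ht, if_pos ht, pvSetMid prefRev rest v 1]
                  exact pvAFold_tail valid_idx segments rest prefRev 1 ih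
                · rw [if_neg ht, if_neg ht]
                  have := pvAFold_tail valid_idx segments rest prefRev v ih
                  rw [hv1'] at this ⊢
                  exact this

-- ===== VERDICT (by name: the statement is the Claim_ definition above) =====
theorem assign_missing_labels_py_spec : Claim_equal_assign_missing_labels_py := by
  intro speakers valid_idx segments _ _
  unfold Spec_assign_missing_labels_py assign_missing_labels_py assign_missing_labels_py_alt
  by_cases h : valid_idx = []
  · simp [h]
  · rw [if_neg h, if_neg h]
    have hA := pvAFold_eq_ref valid_idx segments speakers []
    have hB := pvBLoop_eq_ref valid_idx segments speakers [] 0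
    simp only [List.length_nil, Int.natCast_zero, List.reverse_nil, List.nil_append,
      zero_add] at hA hB
    have h0 : pvNearestPos ([] : List Int) = none := rfl
    rw [h0] at hB
    rw [hA, hB]
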